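/- GENERATED by tools/from_farm_form.py from prooffarm-gif/accepted/DGifBufferedInput.1/Lemmas.lean (a worked proof of the farm's unit `DGifBufferedInput.1`,
   accepted by the verdict) — do not edit. -/
import Gif.Spec.Units.DGifBufferedInput_1
import Gif.Spec.AllSegs

/-!
  Lemmas for the unit `DGifBufferedInput.1` (106540H … 10659DH / 1065A8H; dgif_lib.c:1119-1120, 1143-1147): the prologue of
  an UNPROTECTED function (five pushes), three checked accesses to `pv.Buf`, one checked store through the out-pointer
  `NextByte`.

      bi1_carry        the environment (`HeapInv` at the body's stack pointer ∧ `GifOK` ∧ `rem` unchanged) through the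
                       segment's footprint: the own stack, `pv.Buf`, `*NextByte`
      bi1_index_lt     the index register of `Buf[Buf[1]]` is below 256
      bi1_dec_byte     `Buf[0] − 1` as a byte, for `Buf[0] ≠ 0` (`movzx eax, [rbx] ; sub eax, 1 ; mov [rbx], al`)
-/

open X86 X86.User Asan ProgX.Base ProgX.Base.Spec Gif.Spec

namespace Gif.Spec.DGifBufferedInput_1

/-- **The environment through the footprint of segment 1**: a memory `m` that differs from the entry's only on the function's
stack (below the return-address slot), on `pv.Buf` and on `*NextByte`, with no shadow byte written, keeps the heap's invariant
(with the clean stack ending at the body's stack pointer `RA − 40`), the state invariant, and the reader's measure. -/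
theorem bi1_carry {H : Heap} {rest : List Obj} {frames : List (Nat × FrameLayout)} {F : Forest} {R : Rd} {e : State} {m : Mem}
    (henv : Env H rest frames F R e) (hout : OutPtr H rest frames F R (e.reg .rdx).toNat 1)
    (h8 : (e.reg .rsp).toNat % 8 = 0) (hroom : 0x700000 + 224 ≤ (e.reg .rsp).toNat) (htop : (e.reg .rsp).toNat + 8 ≤ 0x800000)
    (hun : ShadowUntouched e.mem m)
    (hs : Mem.SameExcept
      [⟨(e.reg .rsp).toNat - 224, (e.reg .rsp).toNat⟩,
       ⟨F.pv + 88, F.pv + 344⟩,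
       ⟨(e.reg .rdx).toNat, (e.reg .rdx).toNat + 1⟩] e.mem m) :
    HeapInv H rest frames ((e.reg .rsp).toNat - 40) m ∧ GifOK H F R m ∧ rem R m = rem R e.mem := by
  have hp := henv.heap
  have hok := henv.ok
  have hheap := hp.inv.heap
  have hbase := hp.base
  have hcur := henv.ctx.cursor_range hp.inv.shadow
  have hplaced := hok.owns.placed hheap
  -- every window is loose …
  have hl : ∀ w, w ∈ ([⟨(e.reg .rsp).toNat - 224, (e.reg .rsp).toNat⟩, ⟨F.pv + 88, F.pv + 344⟩,
      ⟨(e.reg .rdx).toNat, (e.reg .rdx).toNat + 1⟩] : List Span) → Loose H F R w := by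
    intro w hw
    simp only [List.mem_cons, List.not_mem_nil, or_false] at hw
    rcases hw with hw | hw | hw
    · subst hw
      exact Loose.stack hheap (by simp only; omega) (by simp only; omega) (by simp only; omega)
    · subst hw
      exact Loose.pvBody (Or.inr ⟨by simp only; omega, by simp only; omega⟩)
    · subst hw
      exact hout.buf.loose
  -- … and a heap window
  have hw : ∀ w, w ∈ ([⟨(e.reg .rsp).toNat - 224, (e.reg .rsp).toNat⟩, ⟨F.pv + 88, F.pv + 344⟩,
      ⟨(e.reg .rdx).toNat, (e.reg .rdx).toNat + 1⟩] : List Span) → HeapWin H w := by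
    intro w hw
    simp only [List.mem_cons, List.not_mem_nil, or_false] at hw
    rcases hw with hw | hw | hw
    · subst hw
      apply HeapWin.offHeap hheap
      left
      simp only
      omega
    · subst hw
      exact HeapWin.pv hheap hok.owns (by simp only; omega) (by simp only; omega)
    · subst hw
      exact hout.buf.win
  refine ⟨?_, ?_, ?_⟩
  · exact (hp.inv.sameExcept hun hs hw).lower (by omega) (by omega) (by omega)
  · exact hok.sameExcept hheap ⟨hcur.1, hcur.2.1⟩ hs hl
  · apply rem_sameExcept hs (by omega)
    intro w hw
    exact (hl w hw).off_cursor hheap hplaced ⟨hcur.1, hcur.2.1⟩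

/-- **`Buf[0] − 1` as a byte** (`movzx eax, BYTE PTR [rbx] ; sub eax, 1 ; mov BYTE PTR [rbx], al`, dgif_lib.c:1144): for a byte
`b ≠ 0` the byte stored, read back, is `b − 1`. -/
theorem bi1_dec_byte (b : Nat) (hb : ¬ b % 256 = 0) (hlt : b < 256) :
    (BitVec.setWidth 8 (BitVec.zeroExtend 32 (BitVec.ofNat 8 b) - 1#32)).toNat % 256 ^ 1 + 1 = b := by
  have h : ∀ x : BitVec 8, BitVec.setWidth 8 (BitVec.zeroExtend 32 x - 1#32) = x - 1#8 := by
    intro x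
    bv_decide
  rw [h]
  have e : (BitVec.ofNat 8 b).toNat = b := by
    rw [BitVec.toNat_ofNat]
    omega
  rw [BitVec.toNat_sub, e]
  simp only [BitVec.toNat_ofNat]
  omega

/-- **A byte index** (`movzx ebp, BYTE PTR [rbx+1] ; movzx ebp, bpl`, dgif_lib.c:1143): the index register of `Buf[Buf[1]]`, as the
walker computed it, is below 256. -/
theorem bi1_index_lt (n : Nat) :
    (Word.ofBV (BitVec.setWidth 64 (BitVec.zeroExtend 32 (BitVec.setWidth 8 (BitVec.zeroExtend 32 (BitVec.ofNat 8 n)))))).toNat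
      < 256 := by
  rw [toNat_ofBV64]
  simp only [BitVec.toNat_setWidth, BitVec.truncate_eq_setWidth, BitVec.toNat_ofNat]
  omega

end Gif.Spec.DGifBufferedInput_1
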